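-- pv_equiv track=rewrite | github.com/alexwhte/kaia | scripts/action_plan_auto.py | extract_spec_sections
-- ===== SOURCE A (Python) =====
-- def extract_spec_sections(spec_content):
--     """Extract key sections from technical spec content"""
--     sections = {}
--     current_section = None
--     current_content = []
--
--     lines = spec_content.split('\n')
--     for line in lines:
--         if line.startswith('## '):
--             # Save previous section
--             if current_section:
--                 sections[current_section] = '\n'.join(current_content).strip()
--             # Start new section
--             current_section = line[3:].strip()
--             current_content = []
--         elif current_section:
--             current_content.append(line)
--
--     # Save last section
--     if current_section:
--         sections[current_section] = '\n'.join(current_content).strip()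
--
--     return sections
-- ===== SOURCE B (Python) =====
-- def extract_spec_sections(spec_content):
--     """Extract key sections from technical spec content"""
--     sections = {}
--     rest = spec_content.split('\n')
--     while rest:
--         line = rest.pop(0)
--         if line.startswith('## '):
--             name = line[3:].strip()
--             body = []
--             while rest and not rest[0].startswith('## '):
--                 body.append(rest.pop(0))
--             if name:
--                 sections[name] = '\n'.join(body).strip()
--     return sections
-- ===== Notes on version B (the rewrite author's own statement) =====
-- stated objective: alternative
-- what changed: Replaced A's line-streaming state machine (carried current_section/current_content with deferred saves and a trailing flush) by a header-driven scanner that, at each section-header line, consumes the whole following body in one inner scan and inserts the section immediately, with no carried section state and no final flush.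
import Mathlib
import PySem

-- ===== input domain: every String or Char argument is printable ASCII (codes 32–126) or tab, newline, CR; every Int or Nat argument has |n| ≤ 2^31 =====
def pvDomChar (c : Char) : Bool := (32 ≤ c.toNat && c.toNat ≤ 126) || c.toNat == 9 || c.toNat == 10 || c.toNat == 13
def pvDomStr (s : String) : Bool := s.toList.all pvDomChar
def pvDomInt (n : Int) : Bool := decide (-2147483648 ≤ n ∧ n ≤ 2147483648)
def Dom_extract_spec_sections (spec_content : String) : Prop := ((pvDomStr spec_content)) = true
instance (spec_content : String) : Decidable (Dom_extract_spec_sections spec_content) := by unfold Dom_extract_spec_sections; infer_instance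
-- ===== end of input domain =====

-- B replaces A's carried-state line scanner by a header-driven scanner that consumes each
-- section's body in one inner scan (alternative decomposition, same cost).

-- ===== PORT A =====
-- Python's `if current_section: sections[current_section] = '\n'.join(current_content).strip()`
-- (current_section is falsy when None or ""); this line occurs twice in A (in the loop and after it)
def pvFlushA (secs : PySem.Dict String String) (cur : Option String) (content : List String) :
    PySem.Dict String String :=
  match cur with
  | some c => if c ≠ "" then secs.insert c (PySem.Str.strip (PySem.Str.join "\n" content)) else secs
  | none => secs

-- one iteration of A's `for line in lines`
def pvStepA (st : PySem.Dict String String × Option String × List String) (line : String) :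
    PySem.Dict String String × Option String × List String :=
  if PySem.Str.startswith line "## " then
    (pvFlushA st.1 st.2.1 st.2.2,
     some (PySem.Str.strip (PySem.Str.slice line (some 3) none)),
     ([] : List String))
  else
    match st.2.1 with
    | some c => if c ≠ "" then (st.1, st.2.1, st.2.2 ++ [line]) else st
    | none => st

def extract_spec_sections (spec_content : String) : List (String × String) :=
  let lines := (PySem.Str.split? spec_content "\n").getD []
  let st := lines.foldl pvStepA (PySem.Dict.empty, none, [])
  (pvFlushA st.1 st.2.1 st.2.2).items

-- ===== PORT B =====
-- `not rest[0].startswith('## ')`, the guard of B's inner body-consuming loop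
def pvNH (line : String) : Bool := !(PySem.Str.startswith line "## ")

-- B's outer `while rest:` loop; the inner `while rest and not rest[0].startswith('## ')`
-- loop is the takeWhile/dropWhile pair
def pvParseB : List String → PySem.Dict String String → PySem.Dict String String
  | [], secs => secs
  | line :: rest, secs =>
    if PySem.Str.startswith line "## " then
      let name := PySem.Str.strip (PySem.Str.slice line (some 3) none)
      let secs' := if name ≠ "" then
          secs.insert name (PySem.Str.strip (PySem.Str.join "\n" (rest.takeWhile pvNH)))
        else secs
      pvParseB (rest.dropWhile pvNH) secs'
    else pvParseB rest secs
  termination_by lines => lines.length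
  decreasing_by
    · exact Nat.lt_succ_of_le (List.length_dropWhile_le _ _)
    · simp

def extract_spec_sections_alt (spec_content : String) : List (String × String) :=
  (pvParseB ((PySem.Str.split? spec_content "\n").getD []) PySem.Dict.empty).items

-- ===== PRECONDITION & SPEC =====
def Spec_extract_spec_sections (spec_content : String) (out : List (String × String)) : Prop := out = extract_spec_sections_alt spec_content
instance (spec_content : String) (out : List (String × String)) : Decidable (Spec_extract_spec_sections spec_content out) := by unfold Spec_extract_spec_sections; infer_instance

-- ===== CLAIM (what is proved, stated in full; the proofs are below) =====
def Claim_equal_extract_spec_sections : Prop := ∀ (spec_content : String), Dom_extract_spec_sections spec_content → Spec_extract_spec_sections spec_content (extract_spec_sections spec_content)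

-- ===== LEMMAS AND PROOFS =====

-- A's final flush applied to a fold state
def pvFinOf (st : PySem.Dict String String × Option String × List String) :
    PySem.Dict String String :=
  pvFlushA st.1 st.2.1 st.2.2

theorem pvParseB_nil (secs : PySem.Dict String String) : pvParseB [] secs = secs := by
  rw [pvParseB]

theorem pvParseB_cons_header (line : String) (rest : List String)
    (secs : PySem.Dict String String) (h : PySem.Str.startswith line "## " = true) :
    pvParseB (line :: rest) secs =
      pvParseB (rest.dropWhile pvNH)
        (if PySem.Str.strip (PySem.Str.slice line (some 3) none) ≠ "" then
          secs.insert (PySem.Str.strip (PySem.Str.slice line (some 3) none))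
            (PySem.Str.strip (PySem.Str.join "\n" (rest.takeWhile pvNH)))
        else secs) := by
  rw [pvParseB, if_pos (by simpa using h)]

theorem pvParseB_cons_nonheader (line : String) (rest : List String)
    (secs : PySem.Dict String String) (h : PySem.Str.startswith line "## " = false) :
    pvParseB (line :: rest) secs = pvParseB rest secs := by
  rw [pvParseB, if_neg (by simpa using h)]

-- B skips leading non-header lines one at a time
theorem pvParseB_skip (lines : List String) (secs : PySem.Dict String String) :
    pvParseB lines secs = pvParseB (lines.dropWhile pvNH) secs := by
  induction lines with
  | nil => rfl
  | cons l rest ih =>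
    cases hl : PySem.Str.startswith l "## " with
    | true => rw [List.dropWhile_cons, if_neg (by simp only [pvNH]; simpa using hl)]
    | false =>
      rw [List.dropWhile_cons, if_pos (by simp only [pvNH]; simpa using hl),
        pvParseB_cons_nonheader l rest secs hl, ih]

-- the loop invariant: A's fold-plus-flush, from any state, equals B's scanner on the
-- remaining lines (three cases for the truthiness of current_section)
theorem pvMain (lines : List String) :
    ∀ (secs : PySem.Dict String String) (content : List String),
      (∀ c : String, c ≠ "" →
        pvFinOf (lines.foldl pvStepA (secs, some c, content)) =
          pvParseB (lines.dropWhile pvNH)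
            (secs.insert c (PySem.Str.strip (PySem.Str.join "\n" (content ++ lines.takeWhile pvNH)))))
      ∧ pvFinOf (lines.foldl pvStepA (secs, none, content)) = pvParseB (lines.dropWhile pvNH) secs
      ∧ pvFinOf (lines.foldl pvStepA (secs, some "", content)) = pvParseB (lines.dropWhile pvNH) secs := by
  induction lines with
  | nil =>
    intro secs content
    refine ⟨fun c hc => ?_, by simp [pvFinOf, pvFlushA, pvParseB_nil], by
      simp [pvFinOf, pvFlushA, pvParseB_nil]⟩
    simp [pvFinOf, pvFlushA, pvParseB_nil, hc]
  | cons l rest ih =>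
    intro secs content
    cases hl : PySem.Str.startswith l "## " with
    | true =>
      have hdw : (l :: rest).dropWhile pvNH = l :: rest := by
        rw [List.dropWhile_cons, if_neg (by simp only [pvNH]; simpa using hl)]
      have htw : (l :: rest).takeWhile pvNH = [] := by
        rw [List.takeWhile_cons, if_neg (by simp only [pvNH]; simpa using hl)]
      -- after the header step the fold state is (flushed dict, some name, [])
      have key : ∀ secs' : PySem.Dict String String,
          pvFinOf (rest.foldl pvStepA
            (secs', some (PySem.Str.strip (PySem.Str.slice l (some 3) none)), [])) =
          pvParseB (l :: rest) secs' := by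
        intro secs'
        rw [pvParseB_cons_header l rest secs' hl]
        by_cases hn : PySem.Str.strip (PySem.Str.slice l (some 3) none) = ""
        · rw [if_neg (by simp [hn]), hn]
          exact (ih secs' ([] : List String)).2.2
        · rw [if_pos hn]
          simpa using (ih secs' ([] : List String)).1 _ hn
      refine ⟨fun c hc => ?_, ?_, ?_⟩
      · rw [hdw, htw, List.foldl_cons, pvStepA, if_pos (by simpa using hl)]
        simp only [pvFlushA, hc, ne_eq, not_false_iff, if_true, List.append_nil]
        exact key _
      · rw [hdw, List.foldl_cons, pvStepA, if_pos (by simpa using hl)]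
        simp only [pvFlushA]
        exact key _
      · rw [hdw, List.foldl_cons, pvStepA, if_pos (by simpa using hl)]
        simp only [pvFlushA, ne_eq, not_true]
        simpa using key secs
    | false =>
      have hdw : (l :: rest).dropWhile pvNH = rest.dropWhile pvNH := by
        rw [List.dropWhile_cons, if_pos (by simp only [pvNH]; simpa using hl)]
      have htw : (l :: rest).takeWhile pvNH = l :: rest.takeWhile pvNH := by
        rw [List.takeWhile_cons, if_pos (by simp only [pvNH]; simpa using hl)]
      refine ⟨fun c hc => ?_, ?_, ?_⟩
      · rw [hdw, htw, List.foldl_cons, pvStepA, if_neg (by simpa using hl)]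
        simp only [hc, ne_eq, not_false_iff, if_true]
        simpa [List.append_assoc] using (ih secs (content ++ [l])).1 c hc
      · rw [hdw, List.foldl_cons, pvStepA, if_neg (by simpa using hl)]
        exact (ih secs content).2.1
      · rw [hdw, List.foldl_cons, pvStepA, if_neg (by simpa using hl)]
        simp only [ne_eq, not_true]
        simpa using (ih secs content).2.2
  
-- ===== VERDICT (by name: the statement is the Claim_ definition above) =====
theorem extract_spec_sections_spec : Claim_equal_extract_spec_sections := by
  intro s _
  unfold Spec_extract_spec_sections extract_spec_sections extract_spec_sections_alt
  have h := (pvMain ((PySem.Str.split? s "\n").getD []) PySem.Dict.empty []).2.1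
  rw [← pvParseB_skip] at h
  exact congrArg PySem.Dict.items h
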